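-- pv_equiv track=rewrite | github.com/filipHartman/checkpoint-1-python-1 | data.py | get_youngest_student
-- ===== SOURCE A (Python) =====
-- def get_youngest_student(students):
--     """
--     Get youngest student from all classes
--
--     IMPORTANT:
--         Implement this function without built-in functions like max(), min()
--         or similar
--
--     :param list students:  students' data
--
--     :returns: youngest student
--     :rtype: list
--     """
--     birth_year_column = 3
--     youngest_student_birth_year = students[0][birth_year_column]
--     youngest_student = students[0]
--     for student_data in students:
--         if student_data[birth_year_column] > youngest_student_birth_year:
--             youngest_student_birth_year = student_data[birth_year_column]
--             youngest_student = student_data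
--
--     return youngest_student
-- ===== SOURCE B (Python) =====
-- def get_youngest_student(students):
--     # Two passes: first compute the maximum birth year, then return the
--     # first student whose birth year equals it (same tie-breaking as A).
--     max_year = students[0][3]
--     for student_data in students:
--         if student_data[3] > max_year:
--             max_year = student_data[3]
--     for student_data in students:
--         if student_data[3] == max_year:
--             return student_data
-- ===== Notes on version B (the rewrite author's own statement) =====
-- stated objective: alternative
-- what changed: Replaces A's single pass that tracks both the best year and the best row with two passes: one computing only the maximum birth year, then a first-match scan for the row whose year equals it.
import Mathlib
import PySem

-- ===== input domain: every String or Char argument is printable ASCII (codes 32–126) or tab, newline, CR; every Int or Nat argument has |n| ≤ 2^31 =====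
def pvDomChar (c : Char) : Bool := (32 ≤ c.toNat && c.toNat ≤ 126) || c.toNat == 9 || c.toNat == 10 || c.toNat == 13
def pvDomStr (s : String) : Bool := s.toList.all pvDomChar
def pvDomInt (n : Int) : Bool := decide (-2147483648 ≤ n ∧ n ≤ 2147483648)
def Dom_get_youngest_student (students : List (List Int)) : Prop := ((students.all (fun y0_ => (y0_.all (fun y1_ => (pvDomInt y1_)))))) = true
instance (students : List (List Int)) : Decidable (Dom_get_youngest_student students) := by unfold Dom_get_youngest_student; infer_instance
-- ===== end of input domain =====

-- B replaces A's single pass tracking (year, row) by two passes: max year, then first row matching it.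

-- ===== PORT A =====
-- A's loop over students, carrying (youngest_student_birth_year, youngest_student).
-- A none from pyGet? is an IndexError in Python; excluded by Pre_, dummy [] here.
def gysALoop : List (List Int) → Int → List Int → List Int
  | [], _, ys => ys
  | s :: t, by_, ys =>
    match PySem.List.pyGet? s 3 with
    | none => []
    | some y => if y > by_ then gysALoop t y s else gysALoop t by_ ys

def get_youngest_student (students : List (List Int)) : List Int :=
  match students with
  | [] => []  -- students[0] raises IndexError (outside Pre_)
  | s0 :: _ =>
    match PySem.List.pyGet? s0 3 with
    | none => []  -- IndexError (outside Pre_)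
    | some y0 => gysALoop students y0 s0

-- ===== PORT B =====
-- first pass: maximum birth year
def gysMaxLoop : List (List Int) → Int → Int
  | [], m => m
  | s :: t, m =>
    match PySem.List.pyGet? s 3 with
    | none => m  -- IndexError (outside Pre_)
    | some y => if y > m then gysMaxLoop t y else gysMaxLoop t m

-- second pass: first student whose year equals the target
def gysFindLoop : List (List Int) → Int → List Int
  | [], _ => []  -- Python falls off the loop returning None; unreachable under Pre_
  | s :: t, m =>
    match PySem.List.pyGet? s 3 with
    | none => []
    | some y => if y == m then s else gysFindLoop t m

def get_youngest_student_alt (students : List (List Int)) : List Int :=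
  match students with
  | [] => []
  | s0 :: _ =>
    match PySem.List.pyGet? s0 3 with
    | none => []
    | some y0 => gysFindLoop students (gysMaxLoop students y0)

-- ===== PRECONDITION & SPEC =====
-- exactly the inputs where Python A returns: nonempty, every row long enough for index 3
def Pre_get_youngest_student (students : List (List Int)) : Prop :=
  students ≠ [] ∧ ∀ s ∈ students, 4 ≤ s.length
instance (students : List (List Int)) : Decidable (Pre_get_youngest_student students) := by
  unfold Pre_get_youngest_student; infer_instance

def pvWitness_get_youngest_student : List (List Int) := [[1, 2, 3, 1999], [4, 5, 6, 2001]]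

def Spec_get_youngest_student (students : List (List Int)) (out : List Int) : Prop := out = get_youngest_student_alt students
instance (students : List (List Int)) (out : List Int) : Decidable (Spec_get_youngest_student students out) := by unfold Spec_get_youngest_student; infer_instance

-- ===== CLAIM (what is proved, stated in full; the proofs are below) =====
def Claim_equal_get_youngest_student : Prop := ∀ (students : List (List Int)), Dom_get_youngest_student students → Pre_get_youngest_student students → Spec_get_youngest_student students (get_youngest_student students)

-- ===== LEMMAS AND PROOFS =====

theorem gysPyGet3 (s : List Int) (hs : 4 ≤ s.length) :
    PySem.List.pyGet? s 3 = some (s.getD 3 0) := by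
  simp only [PySem.List.pyGet?, PySem.List.pyIdx?]
  split
  · rw [if_pos (show (3:Int) < (s.length:Int) by omega)]
    simp [List.getElem?_eq_getElem (show 3 < s.length by omega)]
  · omega

theorem gysMaxLoop_ge (l : List (List Int)) (b : Int) : b ≤ gysMaxLoop l b := by
  induction l generalizing b with
  | nil => simp [gysMaxLoop]
  | cons s t ih =>
    simp only [gysMaxLoop]
    cases PySem.List.pyGet? s 3 with
    | none => exact le_refl b
    | some y =>
      simp only
      split
      · exact le_of_lt (lt_of_lt_of_le (by omega) (ih y))
      · exact ih b

theorem gysKey (l : List (List Int)) (b : Int) (ys : List Int)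
    (h : ∀ s ∈ l, 4 ≤ s.length) :
    gysALoop l b ys = if gysMaxLoop l b > b then gysFindLoop l (gysMaxLoop l b) else ys := by
  induction l generalizing b ys with
  | nil => simp [gysALoop, gysMaxLoop]
  | cons s t ih =>
    have hg : PySem.List.pyGet? s 3 = some (s.getD 3 0) := gysPyGet3 s (h s (by simp))
    have ht : ∀ u ∈ t, 4 ≤ u.length := fun u hu => h u (by simp [hu])
    set y := s.getD 3 0 with hy
    simp only [gysALoop, gysMaxLoop, gysFindLoop, hg]
    by_cases hyb : y > b
    · simp only [if_pos hyb]
      rw [ih _ _ ht]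
      have hge := gysMaxLoop_ge t y
      by_cases hm : gysMaxLoop t y > y
      · rw [if_pos hm, if_pos (by omega), if_neg (by simp; omega)]
      · have hmy : gysMaxLoop t y = y := le_antisymm (by omega) hge
        rw [if_neg hm, hmy, if_pos (by omega), if_pos (by simp)]
    · simp only [if_neg hyb]
      rw [ih _ _ ht]
      by_cases hm : gysMaxLoop t b > b
      · rw [if_pos hm, if_pos hm, if_neg (by simp; omega)]
      · rw [if_neg hm, if_neg hm]

-- ===== VERDICT (by name: the statement is the Claim_ definition above) =====
theorem get_youngest_student_spec : Claim_equal_get_youngest_student := by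
  intro students _ hpre
  obtain ⟨hne, hlen⟩ := hpre
  unfold Spec_get_youngest_student
  match students, hne with
  | s0 :: rest, _ =>
    have h0 : 4 ≤ s0.length := hlen s0 (by simp)
    have hg0 : PySem.List.pyGet? s0 3 = some (s0.getD 3 0) := gysPyGet3 s0 h0
    simp only [get_youngest_student, get_youngest_student_alt, hg0]
    rw [gysKey _ _ _ hlen]
    have hge := gysMaxLoop_ge (s0 :: rest) (s0.getD 3 0)
    by_cases hm : gysMaxLoop (s0 :: rest) (s0.getD 3 0) > s0.getD 3 0
    · rw [if_pos hm]
    · rw [if_neg hm]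
      have heq : gysMaxLoop (s0 :: rest) (s0.getD 3 0) = s0.getD 3 0 := le_antisymm (by omega) hge
      rw [heq]
      simp [gysFindLoop, hg0]
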